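-- pv_equiv track=rewrite | github.com/ezhang7423/learning | usaco/algorithms/maxarray.py | biggestCross
-- ===== SOURCE A (Python) =====
-- import math
--
-- def biggestCross(array, l):
--     mid = math.floor(len(array) / 2)
--     subTop = 0
--     topI = mid - 1
--     currentSum = 0
--     for x in range(mid, len(array)):
--         currentSum += array[x]
--         if currentSum > subTop:
--             topI = x
--             subTop = currentSum
--     bottomI = mid - 1
--     subTop = 0
--     currentSum = 0
--     for x in range(mid - 1, -1, -1):
--         currentSum += array[x]
--         if currentSum > subTop:
--             bottomI = x
--             subTop = currentSum
--     return (bottomI + l, topI + l)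
-- ===== SOURCE B (Python) =====
-- from itertools import accumulate
--
-- def biggestCross(array, l):
--     mid = len(array) // 2
--     right = list(accumulate(array[mid:]))
--     left = list(accumulate(array[mid - 1::-1])) if mid > 0 else []
--     topI = mid - 1
--     if right and max(right) > 0:
--         topI = mid + right.index(max(right))
--     bottomI = mid - 1
--     if left and max(left) > 0:
--         bottomI = mid - 1 - left.index(max(left))
--     return (bottomI + l, topI + l)
-- ===== Notes on version B (the rewrite author's own statement) =====
-- stated objective: alternative
-- what changed: Replaces A's two incremental compare-as-you-go index scans with a build-then-query decomposition: compute the cumulative-sum tables of the two halves with itertools.accumulate, then take max() and .index() (first occurrence) to locate each extent.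
import Mathlib
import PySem

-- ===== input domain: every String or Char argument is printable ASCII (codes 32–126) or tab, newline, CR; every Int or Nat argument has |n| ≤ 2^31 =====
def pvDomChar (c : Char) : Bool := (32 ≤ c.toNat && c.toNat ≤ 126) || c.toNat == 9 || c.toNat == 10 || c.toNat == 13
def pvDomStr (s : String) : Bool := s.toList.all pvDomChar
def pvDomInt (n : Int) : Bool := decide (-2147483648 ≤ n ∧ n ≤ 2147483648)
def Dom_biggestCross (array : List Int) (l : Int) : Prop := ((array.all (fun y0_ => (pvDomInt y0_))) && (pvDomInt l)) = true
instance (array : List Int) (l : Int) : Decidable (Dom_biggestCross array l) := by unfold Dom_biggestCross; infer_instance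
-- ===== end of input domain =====

-- B replaces A's two incremental compare-as-you-go index scans by building the cumulative-sum
-- tables of the two halves and taking max + first index (alternative decomposition, same cost).

-- ===== PORT A =====
-- loop body shared by both of A's scans: state (subTop, topI, currentSum), index x, reads array[x]
def stepA (array : List Int) (st : Int × Int × Int) (x : Int) : Int × Int × Int :=
  let currentSum := st.2.2 + PySem.List.pyGetD array x 0
  if currentSum > st.1 then (currentSum, x, currentSum) else (st.1, st.2.1, currentSum)

def biggestCross (array : List Int) (l : Int) : Int × Int :=
  -- math.floor(len(array)/2): exact integer result for any list length, ported as floor division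
  let mid : Int := PySem.Int.floordiv (array.length : Int) 2
  let top := (PySem.List.pyRange mid (array.length : Int) 1).foldl (stepA array) (0, mid - 1, 0)
  let bot := (PySem.List.pyRange (mid - 1) (-1) (-1)).foldl (stepA array) (0, mid - 1, 0)
  (bot.2.1 + l, top.2.1 + l)

-- ===== PORT B =====
-- itertools.accumulate
def pyAccum : List Int → Int → List Int
  | [], _ => []
  | x :: xs, s => (s + x) :: pyAccum xs (s + x)

def biggestCross_alt (array : List Int) (l : Int) : Int × Int :=
  let mid : Nat := array.length / 2
  let right := pyAccum (array.drop mid) 0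
  let left := if 0 < mid then pyAccum ((array.take mid).reverse) 0 else []
  let topI : Int :=
    match PySem.List.max? right (fun y => y) with
    | some m => if m > 0 then (mid : Int) + ((PySem.List.index? right m).getD 0 : Int)
                else (mid : Int) - 1
    | none => (mid : Int) - 1
  let bottomI : Int :=
    match PySem.List.max? left (fun y => y) with
    | some m => if m > 0 then (mid : Int) - 1 - ((PySem.List.index? left m).getD 0 : Int)
                else (mid : Int) - 1
    | none => (mid : Int) - 1
  (bottomI + l, topI + l)

-- ===== PRECONDITION & SPEC =====
def Spec_biggestCross (array : List Int) (l : Int) (out : Int × Int) : Prop := out = biggestCross_alt array l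
instance (array : List Int) (l : Int) (out : Int × Int) : Decidable (Spec_biggestCross array l out) := by unfold Spec_biggestCross; infer_instance

-- ===== CLAIM (what is proved, stated in full; the proofs are below) =====
def Claim_equal_biggestCross : Prop := ∀ (array : List Int) (l : Int), Dom_biggestCross array l → Spec_biggestCross array l (biggestCross array l)

-- ===== LEMMAS AND PROOFS =====

-- A's scan, abstracted: walk the elements ys, index moving by d from i, state (subTop, topI, currentSum)
def loopG (d : Int) : List Int → Int → Int × Int × Int → Int × Int × Int
  | [], _, st => st
  | y :: ys, i, st =>
      let c := st.2.2 + y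
      if c > st.1 then loopG d ys (i + d) (c, i, c) else loopG d ys (i + d) (st.1, st.2.1, c)

-- the same scan over the precomputed cumulative sums, without the running sum
def argG (d : Int) : List Int → Int → Int × Int → Int × Int
  | [], _, p => p
  | c :: cs, i, p => if c > p.1 then argG d cs (i + d) (c, i) else argG d cs (i + d) (p.1, p.2)

theorem loopG_eq_argG (d : Int) (ys : List Int) (i b t c : Int) :
    loopG d ys i (b, t, c) =
      ((argG d (pyAccum ys c) i (b, t)).1, (argG d (pyAccum ys c) i (b, t)).2, c + ys.sum) := by
  induction ys generalizing i b t c with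
  | nil => simp [loopG, pyAccum, argG]
  | cons y ys ih =>
      simp only [loopG, pyAccum, argG]
      by_cases h : c + y > b
      · simp [h, ih]; ring
      · simp [h, ih]; ring

theorem foldl_max_comm (cs : List Int) (a b : Int) :
    cs.foldl max (max a b) = max a (cs.foldl max b) := by
  induction cs generalizing b with
  | nil => simp
  | cons c cs ih => simp only [List.foldl_cons, max_assoc]; exact ih (max b c)

theorem max?_cons_val (c : Int) (cs : List Int) (m : Int)
    (h : PySem.List.max? cs (fun y => y) = some m) :
    PySem.List.max? (c :: cs) (fun y => y) = some (max c m) := by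
  obtain ⟨h', t', rfl⟩ : ∃ h' t', cs = h' :: t' := by
    cases cs with
    | nil =>
        rw [(PySem.List.max?_eq_none_iff _ _).mpr rfl] at h
        simp at h
    | cons x t => exact ⟨x, t, rfl⟩
  rw [PySem.List.max?_id_cons] at h ⊢
  have : (h' :: t').foldl max c = max c m := by
    simp only [List.foldl_cons]
    rw [foldl_max_comm t' c h', Option.some_inj.mp h]
  simp [this]

-- the crux: the strict-improvement scan over cs computes (first) max and its first index
theorem argG_spec (d : Int) (cs : List Int) (i b t : Int) :
    argG d cs i (b, t) =
      match PySem.List.max? cs (fun y => y) with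
      | none => (b, t)
      | some m => if m > b then (m, i + d * ((PySem.List.index? cs m).getD 0 : Int)) else (b, t) := by
  induction cs generalizing i b t with
  | nil =>
      have h0 : PySem.List.max? ([] : List Int) (fun y => y) = none :=
        (PySem.List.max?_eq_none_iff _ _).mpr rfl
      simp [argG, h0]
  | cons c cs ih =>
      cases hm : PySem.List.max? cs (fun y => y) with
      | none =>
          have : cs = [] := (PySem.List.max?_eq_none_iff _ _).mp hm
          subst this
          simp only [argG]
          by_cases h : c > b
          · simp [h, PySem.List.max?_id_cons, PySem.List.index?_cons_self]
          · simp only [PySem.List.max?_id_cons, List.foldl_nil]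
            rw [if_neg h, if_neg h]
      | some m' =>
          have hmem : m' ∈ cs := PySem.List.max?_mem hm
          obtain ⟨k', hk'⟩ : ∃ k', PySem.List.index? cs m' = some k' :=
            Option.isSome_iff_exists.mp ((PySem.List.index?_isSome_iff _ _).mpr hmem)
          rw [max?_cons_val c cs m' hm]
          simp only [argG]
          by_cases h : c > b
          · rw [if_pos h, ih]
            rw [hm]; dsimp only
            by_cases h2 : m' > c
            · have hmax : max c m' = m' := by omega
              have hne : c ≠ m' := by omega
              rw [if_pos h2, hmax, if_pos (by omega : m' > b)]
              rw [PySem.List.index?_cons_of_ne cs hne, hk']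
              simp; push_cast; ring
            · have hmax : max c m' = c := by omega
              rw [if_neg h2, hmax, if_pos h, PySem.List.index?_cons_self]
              simp
          · rw [if_neg h, ih, hm]; dsimp only
            by_cases h2 : m' > b
            · have hc : ¬ (c > b) := h
              have hmax : max c m' = m' := by omega
              have hne : c ≠ m' := by omega
              rw [if_pos h2, hmax, if_pos (by omega : m' > b)]
              rw [PySem.List.index?_cons_of_ne cs hne, hk']
              simp; push_cast; ring
            · have hmax : max c m' ≤ b := by omega
              rw [if_neg h2]
              rw [if_neg (by omega : ¬ (max c m' > b))]

-- A's first loop, written over pyRange with pyGetD, is loopG 1 over the dropped suffix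
theorem foldl_up_eq_loopG (array : List Int) (a : Nat) (st : Int × Int × Int) :
    (PySem.List.pyRange (a : Int) (array.length : Int) 1).foldl (stepA array) st =
      loopG 1 (array.drop a) (a : Int) st := by
  by_cases h : a < array.length
  · rw [PySem.List.pyRange_one_cons (by exact_mod_cast h)]
    rw [List.drop_eq_getElem_cons h]
    simp only [List.foldl_cons, loopG]
    have hget : PySem.List.pyGetD array (a : Int) 0 = array[a] := by
      rw [PySem.List.pyGetD_natCast]; simp [List.getD, h, List.getElem?_eq_getElem]
    have : ((a : Int) + 1) = ((a + 1 : Nat) : Int) := by push_cast; ring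
    rw [this]
    obtain ⟨b, t, c⟩ := st
    simp only [stepA, hget]
    by_cases hc : c + array[a] > b
    · simp only [if_pos hc]
      exact foldl_up_eq_loopG array (a + 1) _
    · simp only [if_neg hc]
      exact foldl_up_eq_loopG array (a + 1) _
  · rw [PySem.List.pyRange_one_eq_nil (by exact_mod_cast Nat.le_of_not_lt h)]
    rw [List.drop_eq_nil_of_le (Nat.le_of_not_lt h)]
    simp [loopG]
termination_by array.length - a

-- A's second loop, counting down from a-1 to 0, is loopG (-1) over the reversed prefix
theorem foldl_down_eq_loopG (array : List Int) (a : Nat) (ha : a ≤ array.length)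
    (st : Int × Int × Int) :
    (PySem.List.pyRange ((a : Int) - 1) (-1) (-1)).foldl (stepA array) st =
      loopG (-1) ((array.take a).reverse) ((a : Int) - 1) st := by
  induction a generalizing st with
  | zero => simp [PySem.List.pyRange_neg_one_eq_nil (by omega : (0:Int) - 1 ≤ -1), loopG]
  | succ n ih =>
      have hn : n < array.length := by omega
      rw [PySem.List.pyRange_neg_one_cons (by push_cast; omega : (-1:Int) < (↑(n+1) : Int) - 1)]
      have htake : (array.take (n + 1)).reverse = array[n] :: (array.take n).reverse := by
        rw [List.take_add_one, List.getElem?_eq_getElem hn]; simp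
      rw [htake]
      simp only [List.foldl_cons, loopG]
      have hcast : ((n + 1 : Nat) : Int) - 1 = (n : Int) := by push_cast; ring
      rw [hcast]
      have hget : PySem.List.pyGetD array ((n : Nat) : Int) 0 = array[n] := by
        rw [PySem.List.pyGetD_natCast]; simp [List.getD, List.getElem?_eq_getElem hn]
      obtain ⟨b, t, c⟩ := st
      simp only [stepA, hget]
      have hstep : (n : Int) + -1 = (n : Int) - 1 := by ring
      by_cases hc : c + array[n] > b
      · simp only [if_pos hc, hstep]
        exact ih (by omega) _
      · simp only [if_neg hc, hstep]
        exact ih (by omega) _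

-- ===== VERDICT (by name: the statement is the Claim_ definition above) =====
theorem biggestCross_spec : Claim_equal_biggestCross := by
  intro array l _
  show biggestCross array l = biggestCross_alt array l
  unfold biggestCross biggestCross_alt
  have hmid : PySem.Int.floordiv (array.length : Int) 2 = ((array.length / 2 : Nat) : Int) := by
    exact_mod_cast PySem.Int.floordiv_natCast array.length 2
  set mid : Nat := array.length / 2 with hmiddef
  rw [hmid]
  have hup := foldl_up_eq_loopG array mid (0, (mid : Int) - 1, 0)
  have hdown := foldl_down_eq_loopG array mid (Nat.div_le_self _ _) (0, (mid : Int) - 1, 0)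
  have hleft : (if 0 < mid then pyAccum ((array.take mid).reverse) 0 else []) =
      pyAccum ((array.take mid).reverse) 0 := by
    by_cases h : 0 < mid
    · rw [if_pos h]
    · rw [if_neg h]
      have : mid = 0 := by omega
      simp [this, pyAccum]
  simp only [hup, hdown, hleft]
  rw [loopG_eq_argG, loopG_eq_argG]
  rw [argG_spec, argG_spec]
  cases PySem.List.max? (pyAccum (array.drop mid) 0) (fun y => y) with
  | none =>
      cases PySem.List.max? (pyAccum ((array.take mid).reverse) 0) (fun y => y) with
      | none => simp
      | some m =>
          by_cases hm : m > 0
          · simp [hm]; try first | (constructor <;> omega) | omega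
          · simp [hm]; try first | (constructor <;> omega) | omega
  | some m =>
      cases PySem.List.max? (pyAccum ((array.take mid).reverse) 0) (fun y => y) with
      | none =>
          by_cases hm : m > 0
          · simp [hm]; try first | (constructor <;> omega) | omega
          · simp [hm]; try first | (constructor <;> omega) | omega
      | some m' =>
          by_cases hm : m > 0 <;> by_cases hm' : m' > 0 <;>
            simp [hm, hm'] <;> try first | (constructor <;> omega) | omega
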